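-- pv_equiv track=rewrite | github.com/iamshayyos/omegaCalc | minus_handling.py | count_minus
-- ===== SOURCE A (Python) =====
-- def count_minus(pos, inpt):
--     """
--         Counts consecutive minus signs starting from a given position.
--
--         Args:
--             pos (int): The starting position in the input string.
--             inpt (str): The input expression.
--
--         Returns:
--             int: The number of consecutive minus signs.
--         """
--     count = 0
--     for i in range(pos, len(inpt)):
--         if inpt[i] == '-':
--             count += 1
--         else:
--             break
--     return count
-- ===== SOURCE B (Python) =====
-- def count_minus(pos, inpt):
--     """Counts consecutive minus signs starting from a given position."""
--     tail = inpt[pos:]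
--     return len(tail) - len(tail.lstrip('-'))
-- ===== Notes on version B (the rewrite author's own statement) =====
-- stated objective: idiomatic
-- what changed: Replaces the index-by-index loop with if/break by taking the suffix inpt[pos:] and measuring how much lstrip('-') removes from it.
-- outside the precondition, e.g. on count_minus(-2, '--'): A returns 4, B returns 2
import Mathlib
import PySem

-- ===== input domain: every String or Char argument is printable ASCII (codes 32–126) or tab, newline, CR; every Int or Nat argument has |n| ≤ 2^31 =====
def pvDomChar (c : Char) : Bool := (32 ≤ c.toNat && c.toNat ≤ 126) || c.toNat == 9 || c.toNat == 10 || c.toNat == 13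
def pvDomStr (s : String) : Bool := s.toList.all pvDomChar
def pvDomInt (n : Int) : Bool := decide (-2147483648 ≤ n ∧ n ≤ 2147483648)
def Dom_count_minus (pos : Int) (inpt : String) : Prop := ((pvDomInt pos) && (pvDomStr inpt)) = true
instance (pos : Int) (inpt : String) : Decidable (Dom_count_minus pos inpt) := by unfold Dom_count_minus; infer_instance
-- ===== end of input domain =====

-- B replaces A's index loop with suffix-then-lstrip('-') measurement (idiomatic, same cost).

-- ===== PORT A =====
-- A's for-loop over range(pos, len(inpt)) with break; pyGet? none = IndexError (excluded by Pre_).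
def countMinusLoop : List Int → List Char → Int → Int
  | [], _, count => count
  | i :: rest, cs, count =>
    match PySem.List.pyGet? cs i with
    | none => count
    | some c => if c = '-' then countMinusLoop rest cs (count + 1) else count

def count_minus (pos : Int) (inpt : String) : Int :=
  countMinusLoop (PySem.List.pyRange pos (inpt.toList.length : Int) 1) inpt.toList 0

-- ===== PORT B =====
-- tail = inpt[pos:]; len(tail) - len(tail.lstrip('-')).  lstrip('-') drops leading '-' chars,
-- ported exactly as dropWhile (· == '-').
def count_minus_alt (pos : Int) (inpt : String) : Int :=
  let tail := PySem.List.slice inpt.toList (some pos) none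
  (tail.length : Int) - ((tail.dropWhile (· == '-')).length : Int)

-- ===== PRECONDITION & SPEC =====
-- Pre_ excludes negative pos: there A's negative indexing raises IndexError (pos < -len) or
-- wraps around and re-scans the string from its start (-len ≤ pos < 0), an accidental
-- double-count no caller of a position-based scanner would rely on; B takes the clean suffix.
def Pre_count_minus (pos : Int) (inpt : String) : Prop := 0 ≤ pos
instance (pos : Int) (inpt : String) : Decidable (Pre_count_minus pos inpt) := by unfold Pre_count_minus; infer_instance
def pvWitness_count_minus : Int × String := (0, "--a")

def Spec_count_minus (pos : Int) (inpt : String) (out : Int) : Prop := out = count_minus_alt pos inpt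
instance (pos : Int) (inpt : String) (out : Int) : Decidable (Spec_count_minus pos inpt out) := by unfold Spec_count_minus; infer_instance

-- ===== CLAIM (what is proved, stated in full; the proofs are below) =====
def Claim_equal_count_minus : Prop := ∀ (pos : Int) (inpt : String), Dom_count_minus pos inpt → Pre_count_minus pos inpt → Spec_count_minus pos inpt (count_minus pos inpt)

-- ===== LEMMAS AND PROOFS =====
lemma countMinusLoop_suffix (t : List Char) : ∀ (cs : List Char) (p count : Int),
    0 ≤ p → cs.drop p.toNat = t →
    countMinusLoop (PySem.List.pyRange p (cs.length : Int) 1) cs count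
      = count + ((t.takeWhile (· == '-')).length : Int) := by
  induction t with
  | nil =>
    intro cs p count hp hdrop
    have hlen : cs.length ≤ p.toNat := by
      by_contra h
      have := List.drop_eq_nil_iff.mp hdrop
      omega
    rw [PySem.List.pyRange_one_eq_nil (by omega)]
    simp [countMinusLoop]
  | cons c t' ih =>
    intro cs p count hp hdrop
    have hlt : p.toNat < cs.length := by
      by_contra h
      rw [List.drop_eq_nil_iff.mpr (by omega)] at hdrop
      exact List.cons_ne_nil c t' hdrop.symm
    have hplt : p < (cs.length : Int) := by omega
    have hget : cs[p.toNat]? = some c := by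
      rw [← List.head?_drop, hdrop, List.head?_cons]
    rw [PySem.List.pyRange_one_cons hplt]
    have hpy : PySem.List.pyGet? cs p = some c := by
      rw [PySem.List.pyGet?_of_nonneg cs hp, hget]
    simp only [countMinusLoop, hpy]
    by_cases hc : c = '-'
    · subst hc
      have hdrop' : cs.drop (p + 1).toNat = t' := by
        have : (p + 1).toNat = p.toNat + 1 := by omega
        rw [this, ← List.drop_drop, hdrop]
        simp
      rw [if_pos rfl, ih cs (p + 1) (count + 1) (by omega) hdrop']
      simp [List.takeWhile]
      ring
    · rw [if_neg hc]
      have hcb : (c == '-') = false := by simp [hc]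
      simp [List.takeWhile, hcb]

lemma takeWhile_len (t : List Char) :
    ((t.takeWhile (· == '-')).length : Int) = (t.length : Int) - ((t.dropWhile (· == '-')).length : Int) := by
  have h := congrArg List.length (List.takeWhile_append_dropWhile (p := (· == '-')) (l := t))
  rw [List.length_append] at h
  omega

-- ===== VERDICT (by name: the statement is the Claim_ definition above) =====
theorem count_minus_spec : Claim_equal_count_minus := by
  intro pos inpt _ hpre
  unfold Spec_count_minus count_minus count_minus_alt Pre_count_minus at *
  rw [countMinusLoop_suffix (inpt.toList.drop pos.toNat) inpt.toList pos 0 hpre rfl,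
      PySem.List.slice_from _ hpre, takeWhile_len]
  ring
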